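-- pv_equiv track=rewrite | github.com/TatianaBelova333/grocery_store_app | part1.py | generate_sequence
-- ===== SOURCE A (Python) =====
-- def generate_sequence(n: int) -> str | int | list[int]:
--     """
--     Generate a sequence of integers
--     where each num appears num times (e.g. 122333444455555...)
--     and the sequence length equals n.
--
--     """
--     if n <= 0:
--         return ''
--     if n == 1:
--         return 1
--     result = []
--     result_len = 0
--     num = 1
--     while result_len < n:
--         diff = n - result_len
--         num_count = min(diff, num)
--         result += [num] * num_count
--         result_len += num_count
--         num += 1
--
--     return result
-- ===== SOURCE B (Python) =====
-- import math
--
--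
-- def generate_sequence(n: int) -> str | int | list[int]:
--     """Same sequence, but each element computed directly from its 1-based
--     position p: the value is the smallest k with k(k+1)/2 >= p, obtained
--     via integer square root."""
--     if n <= 0:
--         return ''
--     if n == 1:
--         return 1
--     return [(math.isqrt(8 * p - 7) + 1) // 2 for p in range(1, n + 1)]
-- ===== Notes on version B (the rewrite author's own statement) =====
-- stated objective: alternative
-- what changed: B computes each element directly from its 1-based position with math.isqrt (smallest k with k(k+1)/2 >= p) in a single comprehension, eliminating A's while loop with its result_len/num accumulators and chunk-wise list extension.
-- outside the precondition, e.g. on generate_sequence(0): A returns '', B returns ''; on generate_sequence(1): A returns 1, B returns 1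
import Mathlib
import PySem

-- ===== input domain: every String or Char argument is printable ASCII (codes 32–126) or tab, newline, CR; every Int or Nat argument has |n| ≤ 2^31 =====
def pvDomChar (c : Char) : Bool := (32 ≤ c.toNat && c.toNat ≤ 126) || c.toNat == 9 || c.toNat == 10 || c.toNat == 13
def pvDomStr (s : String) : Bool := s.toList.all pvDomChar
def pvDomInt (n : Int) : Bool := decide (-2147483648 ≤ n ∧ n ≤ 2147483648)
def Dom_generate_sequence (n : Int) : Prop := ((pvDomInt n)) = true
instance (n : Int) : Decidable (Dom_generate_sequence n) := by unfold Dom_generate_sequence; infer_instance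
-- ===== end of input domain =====

-- B computes each element directly from its 1-based position via integer square root,
-- eliminating A's while loop with its result_len/num accumulators (objective: alternative).

-- ===== PORT A =====
-- the while loop of A; hnum records that num starts at 1 and only increases (for termination)
def genLoopA (n : Int) (result : List Int) (result_len : Int) (num : Int) (hnum : 1 ≤ num) : List Int :=
  if h : result_len < n then
    let diff := n - result_len
    let num_count := min diff num
    genLoopA n (result ++ List.replicate num_count.toNat num) (result_len + num_count) (num + 1) (by omega)
  else result
termination_by (n - result_len).toNat
decreasing_by omega

def generate_sequence (n : Int) : List Int :=
  if n ≤ 0 then []        -- Python returns '' here, not a list of ints: outside Pre_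
  else if n = 1 then []   -- Python returns the int 1 here, not a list: outside Pre_
  else genLoopA n [] 0 1 (by norm_num)

-- ===== PORT B =====
-- math.isqrt on the nonnegative 8*p-7 → Nat.sqrt; (… + 1) // 2 → PySem.Int.floordiv
def generate_sequence_alt (n : Int) : List Int :=
  if n ≤ 0 then []        -- Python returns '' here: outside Pre_
  else if n = 1 then []   -- Python returns the int 1 here: outside Pre_
  else (PySem.List.pyRange 1 (n + 1) 1).map
    (fun p => PySem.Int.floordiv ((Nat.sqrt (8 * p - 7).toNat : Int) + 1) 2)

-- ===== PRECONDITION & SPEC =====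
-- Pre_ excludes exactly n ≤ 0 and n = 1, where Python A returns '' resp. the int 1 —
-- values that are not of the declared list-of-int type (B does the same there).
def Pre_generate_sequence (n : Int) : Prop := 2 ≤ n
instance (n : Int) : Decidable (Pre_generate_sequence n) := by unfold Pre_generate_sequence; infer_instance
def pvWitness_generate_sequence : Int := (7)

def Spec_generate_sequence (n : Int) (out : List Int) : Prop := out = generate_sequence_alt n
instance (n : Int) (out : List Int) : Decidable (Spec_generate_sequence n out) := by unfold Spec_generate_sequence; infer_instance

-- ===== CLAIM (what is proved, stated in full; the proofs are below) =====
def Claim_equal_generate_sequence : Prop := ∀ (n : Int), Dom_generate_sequence n → Pre_generate_sequence n → Spec_generate_sequence n (generate_sequence n)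

-- ===== LEMMAS AND PROOFS =====

-- B's position formula: for p in the num-th triangular block, it returns num.
lemma fval (num p : Int) (hk : 1 ≤ num) (h1 : num * (num - 1) + 2 ≤ 2 * p)
    (h2 : 2 * p ≤ num * (num + 1)) :
    PySem.Int.floordiv ((Nat.sqrt (8 * p - 7).toNat : Int) + 1) 2 = num := by
  have hp : 1 ≤ p := by nlinarith
  have hMnn : (0:Int) ≤ 8 * p - 7 := by omega
  have hMi : ((8 * p - 7).toNat : Int) = 8 * p - 7 := Int.toNat_of_nonneg hMnn
  have hK : ((num.toNat : Int)) = num := Int.toNat_of_nonneg (by omega)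
  have hlo : 2 * num.toNat - 1 ≤ Nat.sqrt (8 * p - 7).toNat := by
    rw [Nat.le_sqrt]
    zify [show (1:Nat) ≤ 2 * num.toNat by omega]
    rw [hMi]; push_cast [hK]; nlinarith
  have hhi : Nat.sqrt (8 * p - 7).toNat < 2 * num.toNat + 1 := by
    rw [Nat.sqrt_lt]
    zify
    rw [hMi]; push_cast [hK]; nlinarith
  rw [PySem.Int.floordiv_eq_ediv_of_pos (by norm_num)]
  omega

-- Loop characterization: provided the completed-blocks invariant, the loop appends
-- B's formula applied to each remaining position.
lemma loopA_eq (n : Int) : ∀ (fuel : Nat) (result_len num : Int) (result : List Int)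
    (hnum : 1 ≤ num), (n - result_len).toNat = fuel →
    (result_len < n → 2 * result_len = num * (num - 1)) →
    genLoopA n result result_len num hnum =
      result ++ (PySem.List.pyRange (result_len + 1) (n + 1) 1).map
        (fun p => PySem.Int.floordiv ((Nat.sqrt (8 * p - 7).toNat : Int) + 1) 2) := by
  intro fuel
  induction fuel using Nat.strong_induction_on with
  | _ fuel ih =>
    intro result_len num result hnum hfuel hinv
    rw [genLoopA.eq_def]
    by_cases h : result_len < n
    · simp only [h, dif_pos]
      have hinv' := hinv h
      set c := min (n - result_len) num with hc
      have hc1 : 1 ≤ c := by omega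
      have hcle : c ≤ num := by omega
      rw [ih (n - (result_len + c)).toNat (by omega) _ _ _ (by omega) rfl
          (by intro hlt; have : c = num := by omega
              rw [this]; ring_nf; nlinarith [hinv'])]
      rw [PySem.List.pyRange_one_append (result_len + 1) (result_len + c + 1) (n + 1)
          (by omega) (by omega), List.map_append, List.append_assoc]
      congr 2
      -- the block of c positions all map to num; the tail ranges are syntactically equal
      have hall : ∀ p ∈ PySem.List.pyRange (result_len + 1) (result_len + c + 1) 1,
            PySem.Int.floordiv ((Nat.sqrt (8 * p - 7).toNat : Int) + 1) 2 = num := by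
          intro p hp
          rw [PySem.List.mem_pyRange_one] at hp
          obtain ⟨hp1, hp2⟩ := hp
          exact fval num p hnum (by nlinarith [hinv']) (by nlinarith [hinv', hcle])
      rw [List.map_congr_left hall]
      rw [List.map_const']
      rw [PySem.List.length_pyRange_one]
      congr 1
      all_goals omega
    · rw [dif_neg h]
      rw [PySem.List.pyRange_one_eq_nil (by omega), List.map_nil, List.append_nil]

-- ===== VERDICT (by name: the statement is the Claim_ definition above) =====
theorem generate_sequence_spec : Claim_equal_generate_sequence := by
  intro n _ hpre
  have h2 : (2:Int) ≤ n := hpre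
  unfold Spec_generate_sequence generate_sequence generate_sequence_alt
  rw [if_neg (by omega), if_neg (by omega), if_neg (by omega), if_neg (by omega)]
  rw [loopA_eq n (n - 0).toNat 0 1 [] (by norm_num) rfl (by intro _; ring)]
  simp
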